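-- pv_equiv track=rewrite | github.com/AlexisNeri/Fuzzy_GA_Curve | lib.py | find_best_in_generation
-- ===== SOURCE A (Python) =====
-- def find_best_in_generation(survivors):
--     attitude_tag_list = []
--     winner = []
--     for chromosome in survivors:
--         attitude_tag_list.append(chromosome[-1])
--
--     best_in_generation = min(attitude_tag_list)
--
--     for candidate in survivors:
--         if best_in_generation == candidate[-1]:
--             winner = candidate
--     return winner
-- ===== SOURCE B (Python) =====
-- def find_best_in_generation(survivors):
--     # Single argmin pass: min keeps the FIRST minimal element, so scanning the
--     # reversed list yields the LAST minimal candidate, matching A's overwrite loop.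
--     return min(reversed(survivors), key=lambda c: c[-1])
-- ===== Notes on version B (the rewrite author's own statement) =====
-- stated objective: simpler
-- what changed: Replaces A's two passes (collect all last-element tags, take min, then rescan overwriting the winner) with a single built-in argmin over the reversed list; min's keep-first tie rule on the reversed list reproduces A's last-match overwrite.
import Mathlib
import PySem

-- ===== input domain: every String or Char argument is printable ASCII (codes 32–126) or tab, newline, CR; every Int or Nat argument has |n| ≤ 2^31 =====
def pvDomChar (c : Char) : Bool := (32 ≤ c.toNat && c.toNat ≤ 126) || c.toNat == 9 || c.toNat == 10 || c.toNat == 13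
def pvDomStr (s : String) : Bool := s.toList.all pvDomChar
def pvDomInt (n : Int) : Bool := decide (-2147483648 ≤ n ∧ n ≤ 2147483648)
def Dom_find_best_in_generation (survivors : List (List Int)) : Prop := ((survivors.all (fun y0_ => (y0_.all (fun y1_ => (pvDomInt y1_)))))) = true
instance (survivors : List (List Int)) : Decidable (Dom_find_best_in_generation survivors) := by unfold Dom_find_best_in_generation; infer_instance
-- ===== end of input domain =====

-- B replaces A's two passes (collect tags, min, rescan-overwrite) with one argmin over the
-- reversed list (objective: simpler); A = B on all nonempty survivor lists of nonempty chromosomes.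


-- ===== PORT A =====
-- chromosome[-1]; Pre_ guarantees nonemptiness, so the `.getD 0` default is never the value used
def pyTag (c : List Int) : Int := (PySem.List.pyGet? c (-1)).getD 0

def find_best_in_generation (survivors : List (List Int)) : List Int :=
  let attitude_tag_list : List Int :=
    survivors.foldl (fun acc chromosome => acc ++ [pyTag chromosome]) []
  let best_in_generation : Int :=
    (PySem.List.min? attitude_tag_list (fun x => x)).getD 0
  survivors.foldl
    (fun winner candidate =>
      if best_in_generation = pyTag candidate then candidate else winner) []

-- ===== PORT B =====
def find_best_in_generation_alt (survivors : List (List Int)) : List Int :=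
  (PySem.List.min? survivors.reverse (fun c => pyTag c)).getD []

-- ===== PRECONDITION & SPEC =====
-- Pre_ excludes exactly the inputs where Python A raises (ValueError from min when the survivors
-- list is empty; IndexError from chromosome[-1] when some chromosome is empty); B raises the
-- same exceptions on the same inputs, so nothing A returns on is excluded.
def Pre_find_best_in_generation (survivors : List (List Int)) : Prop :=
  survivors ≠ [] ∧ ∀ c ∈ survivors, c ≠ []
instance (survivors : List (List Int)) : Decidable (Pre_find_best_in_generation survivors) := by
  unfold Pre_find_best_in_generation; infer_instance
def pvWitness_find_best_in_generation : List (List Int) := [[1, 5], [2, 3]]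

def Spec_find_best_in_generation (survivors : List (List Int)) (out : List Int) : Prop := out = find_best_in_generation_alt survivors
instance (survivors : List (List Int)) (out : List Int) : Decidable (Spec_find_best_in_generation survivors out) := by unfold Spec_find_best_in_generation; infer_instance

-- ===== CLAIM (what is proved, stated in full; the proofs are below) =====
def Claim_equal_find_best_in_generation : Prop := ∀ (survivors : List (List Int)), Dom_find_best_in_generation survivors → Pre_find_best_in_generation survivors → Spec_find_best_in_generation survivors (find_best_in_generation survivors)

-- ===== LEMMAS AND PROOFS =====

-- A's tag-collecting append loop builds the map
theorem tagloop_eq_map (l : List (List Int)) (acc : List Int) :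
    l.foldl (fun a c => a ++ [pyTag c]) acc = acc ++ l.map pyTag := by
  induction l generalizing acc with
  | nil => simp
  | cons c t ih => simp [List.foldl_cons, ih]

-- foldl min attains its value
theorem nmin_mem (l : List Int) (a : Int) : l.foldl min a ∈ a :: l := by
  induction l generalizing a with
  | nil => simp
  | cons c t ih =>
    rcases List.mem_cons.mp (ih (min a c)) with h | h
    · simp only [List.foldl_cons, List.mem_cons, h]
      rcases le_total a c with hc | hc
      · left; exact min_eq_left hc
      · right; left; exact min_eq_right hc
    · simp only [List.foldl_cons, List.mem_cons]
      right; right; exact h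

-- foldl min is a lower bound
theorem nmin_le (l : List Int) (a : Int) : ∀ z ∈ a :: l, l.foldl min a ≤ z := by
  induction l generalizing a with
  | nil => simp
  | cons c t ih =>
    intro z hz
    simp only [List.mem_cons] at hz
    rcases hz with rfl | rfl | hz
    · exact le_trans (ih _ _ (List.mem_cons_self)) (min_le_left _ _)
    · exact le_trans (ih _ _ (List.mem_cons_self)) (min_le_right _ _)
    · exact ih _ _ (List.mem_cons_of_mem _ hz)

-- A's overwrite loop returns the LAST match = first match of the reversed list
theorem owfold_eq_find (l : List (List Int)) (m : Int) (w : List Int) :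
    l.foldl (fun winner candidate => if m = pyTag candidate then candidate else winner) w
      = (l.reverse.find? (fun c => decide (m = pyTag c))).getD w := by
  induction l generalizing w with
  | nil => simp
  | cons c t ih =>
    simp only [List.foldl_cons, List.reverse_cons, List.find?_append, ih]
    cases h : t.reverse.find? (fun c => decide (m = pyTag c)) with
    | some r => simp [Option.or]
    | none =>
      by_cases hm : m = pyTag c <;> simp [Option.or, List.find?, hm]

-- one step of B's min? scan absorbs the head pair into the strict-min of the two
theorem min?_step (b c : List Int) (t : List (List Int)) :
    PySem.List.min? (b :: c :: t) (fun c => pyTag c)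
      = PySem.List.min? ((if pyTag c < pyTag b then c else b) :: t) (fun c => pyTag c) := by
  by_cases hc : pyTag c < pyTag b <;> simp [PySem.List.min?, List.foldl_cons, hc]

-- B's min? returns the FIRST element attaining the minimum tag
theorem min?_first (l : List (List Int)) (b : List Int) :
    PySem.List.min? (b :: l) (fun c => pyTag c)
      = (b :: l).find? (fun c => decide (pyTag c = (l.map pyTag).foldl min (pyTag b))) := by
  induction l generalizing b with
  | nil => simp [PySem.List.min?, List.find?]
  | cons c t ih =>
    have hM : ((c :: t).map pyTag).foldl min (pyTag b)
        = (t.map pyTag).foldl min (min (pyTag b) (pyTag c)) := by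
      simp [List.foldl_cons]
    by_cases hc : pyTag c < pyTag b
    · have hb' : min (pyTag b) (pyTag c) = pyTag c := min_eq_right (le_of_lt hc)
      have hble : (t.map pyTag).foldl min (pyTag c) ≤ pyTag c :=
        nmin_le _ _ _ (List.mem_cons_self)
      have hbne : decide (pyTag b = (t.map pyTag).foldl min (pyTag c)) = false := by
        apply decide_eq_false
        intro h; rw [h] at hc; exact absurd (lt_of_le_of_lt hble hc) (lt_irrefl _)
      rw [min?_step, if_pos hc, ih c, hM, hb']
      simp [List.find?_cons, hbne]
    · have hb' : min (pyTag b) (pyTag c) = pyTag b := min_eq_left (le_of_not_gt hc)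
      rw [min?_step, if_neg hc, ih b, hM, hb']
      have hble : (t.map pyTag).foldl min (pyTag b) ≤ pyTag b :=
        nmin_le _ _ _ (List.mem_cons_self)
      by_cases hbm : pyTag b = (t.map pyTag).foldl min (pyTag b)
      · have h1 : decide (pyTag b = (t.map pyTag).foldl min (pyTag b)) = true :=
          decide_eq_true hbm
        simp [h1]
      · have h1 : decide (pyTag b = (t.map pyTag).foldl min (pyTag b)) = false :=
          decide_eq_false hbm
        have hcm : decide (pyTag c = (t.map pyTag).foldl min (pyTag b)) = false := by
          apply decide_eq_false
          intro h
          have h1' : pyTag c ≤ pyTag b := le_trans (le_of_eq h) hble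
          have h2 : pyTag b ≤ pyTag c := le_of_not_gt hc
          exact hbm (by omega)
        simp [h1, hcm]

-- ===== VERDICT (by name: the statement is the Claim_ definition above) =====
theorem find_best_in_generation_spec : Claim_equal_find_best_in_generation := by
  intro survivors _ hpre
  unfold Spec_find_best_in_generation
  obtain ⟨hne, _⟩ := hpre
  obtain ⟨x, rest, rfl⟩ : ∃ x rest, survivors = x :: rest := by
    cases survivors with
    | nil => exact absurd rfl hne
    | cons x rest => exact ⟨x, rest, rfl⟩
  obtain ⟨y, r', hrev⟩ : ∃ y r', (x :: rest).reverse = y :: r' := by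
    cases h : (x :: rest).reverse with
    | nil => exact absurd (List.reverse_eq_nil_iff.mp h) (by simp)
    | cons y r' => exact ⟨y, r', rfl⟩
  -- the two minimum VALUES agree (min over a list and over its reverse)
  have humap : ((x :: rest).map pyTag).reverse = (y :: r').map pyTag := by
    rw [← hrev, List.map_reverse]
  have hv : (rest.map pyTag).foldl min (pyTag x) = (r'.map pyTag).foldl min (pyTag y) := by
    have h1m : (rest.map pyTag).foldl min (pyTag x) ∈ (x :: rest).map pyTag := nmin_mem _ _
    have h2m : (r'.map pyTag).foldl min (pyTag y) ∈ (x :: rest).map pyTag := by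
      rw [← List.mem_reverse, humap]; exact nmin_mem _ _
    have h1m' : (rest.map pyTag).foldl min (pyTag x) ∈ (y :: r').map pyTag := by
      rw [← humap, List.mem_reverse]; exact h1m
    have h1le := nmin_le (rest.map pyTag) (pyTag x) _ h2m
    have h2le := nmin_le (r'.map pyTag) (pyTag y) _ h1m'
    omega
  -- evaluate port A
  have hA : find_best_in_generation (x :: rest)
      = ((y :: r').find? (fun c =>
          decide (pyTag c = (r'.map pyTag).foldl min (pyTag y)))).getD [] := by
    unfold find_best_in_generation
    simp only [tagloop_eq_map, List.nil_append, List.map_cons,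
      PySem.List.min?_id_cons, Option.getD_some]
    rw [owfold_eq_find, hrev, hv]
    congr 1
    congr 1
    funext c
    rw [decide_eq_decide]
    exact eq_comm
  -- evaluate port B
  have hB : find_best_in_generation_alt (x :: rest)
      = ((y :: r').find? (fun c =>
          decide (pyTag c = (r'.map pyTag).foldl min (pyTag y)))).getD [] := by
    unfold find_best_in_generation_alt
    rw [hrev, min?_first]
  rw [hA, hB]
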